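-- pv_equiv track=rewrite | github.com/arytiwari/jioastro | backend/app/services/palmistry_interpretation_service.py | _determine_motivations
-- ===== SOURCE A (Python) =====
-- from typing import Dict, List, Optional, Tuple
--
-- def _determine_motivations(mounts: List[Dict]) -> str:
--     """Determine primary motivations from mounts."""
--     motivations = []
--     prominent = [m.get("mount_name") for m in mounts if m.get("prominence") in ["prominent", "very_prominent"]]
--
--     if "Jupiter" in prominent:
--         motivations.append("Achievement and recognition")
--     if "Saturn" in prominent:
--         motivations.append("Knowledge and understanding")
--     if "Apollo" in prominent:
--         motivations.append("Creative expression and beauty")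
--     if "Mercury" in prominent:
--         motivations.append("Communication and commerce")
--     if "Venus" in prominent:
--         motivations.append("Love and connection")
--     if "Luna" in prominent:
--         motivations.append("Imagination and exploration")
--
--     return ", ".join(motivations) if motivations else "Balanced personal growth"
-- ===== SOURCE B (Python) =====
-- _NAMES = ("Jupiter", "Saturn", "Apollo", "Mercury", "Venus", "Luna")
-- _PHRASES = (
--     "Achievement and recognition",
--     "Knowledge and understanding",
--     "Creative expression and beauty",
--     "Communication and commerce",
--     "Love and connection",
--     "Imagination and exploration",
-- )
--
-- def _determine_motivations(mounts):
--     """Determine primary motivations from mounts (single-pass bitmask accumulator)."""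
--     mask = 0
--     for m in mounts:
--         if m.get("prominence") in ("prominent", "very_prominent"):
--             try:
--                 mask |= 1 << _NAMES.index(m.get("mount_name"))
--             except ValueError:
--                 pass
--     parts = [p for i, p in enumerate(_PHRASES) if mask >> i & 1]
--     return ", ".join(parts) if parts else "Balanced personal growth"
-- ===== Notes on version B (the rewrite author's own statement) =====
-- stated objective: alternative
-- what changed: B makes a single pass over mounts accumulating a 6-bit prominence bitmask (no intermediate list of names, no membership scans), then decodes the mask into phrases; A builds a list of prominent names and runs six membership tests.
import Mathlib
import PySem

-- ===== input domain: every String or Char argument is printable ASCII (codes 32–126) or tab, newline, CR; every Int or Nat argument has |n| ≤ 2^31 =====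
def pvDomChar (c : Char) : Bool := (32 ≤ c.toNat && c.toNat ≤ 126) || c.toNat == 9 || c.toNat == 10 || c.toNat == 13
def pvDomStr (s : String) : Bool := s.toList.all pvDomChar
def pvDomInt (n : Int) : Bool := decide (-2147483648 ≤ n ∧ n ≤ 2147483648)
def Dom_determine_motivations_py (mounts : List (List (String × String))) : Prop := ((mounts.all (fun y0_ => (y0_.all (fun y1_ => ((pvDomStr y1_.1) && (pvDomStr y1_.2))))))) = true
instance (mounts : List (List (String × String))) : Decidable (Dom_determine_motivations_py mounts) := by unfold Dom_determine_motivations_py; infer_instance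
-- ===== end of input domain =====

-- B accumulates a 6-bit prominence bitmask in one pass and decodes it into phrases,
-- instead of A's prominent-name list plus six membership tests (objective: alternative).

-- ===== PORT A =====
-- prominent = [m.get("mount_name") for m in mounts if m.get("prominence") in ["prominent","very_prominent"]]
def pvProminentA (mounts : List (List (String × String))) : List (Option String) :=
  (mounts.filter (fun m =>
    let p := (PySem.Dict.mk m).get? "prominence"
    p == some "prominent" || p == some "very_prominent")).map
    (fun m => (PySem.Dict.mk m).get? "mount_name")

def determine_motivations_py (mounts : List (List (String × String))) : String :=
  let prominent := pvProminentA mounts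
  let motivations : List String := []
  let motivations := if prominent.contains (some "Jupiter") then motivations ++ ["Achievement and recognition"] else motivations
  let motivations := if prominent.contains (some "Saturn") then motivations ++ ["Knowledge and understanding"] else motivations
  let motivations := if prominent.contains (some "Apollo") then motivations ++ ["Creative expression and beauty"] else motivations
  let motivations := if prominent.contains (some "Mercury") then motivations ++ ["Communication and commerce"] else motivations
  let motivations := if prominent.contains (some "Venus") then motivations ++ ["Love and connection"] else motivations
  let motivations := if prominent.contains (some "Luna") then motivations ++ ["Imagination and exploration"] else motivations
  if motivations = [] then "Balanced personal growth" else PySem.Str.join ", " motivations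

-- ===== PORT B =====
def pvNAMES : List String := ["Jupiter", "Saturn", "Apollo", "Mercury", "Venus", "Luna"]
def pvPHRASES : List String :=
  ["Achievement and recognition", "Knowledge and understanding",
   "Creative expression and beauty", "Communication and commerce",
   "Love and connection", "Imagination and exploration"]

-- _NAMES.index(m.get("mount_name")): None (missing key) is never in _NAMES, so it raises
-- ValueError, which Source B catches and skips; here that is the 'none => none' branch.
def pvNamesIndex (x : Option String) : Option Nat :=
  match x with
  | some s => PySem.List.index? pvNAMES s
  | none => none

-- the loop body: mask |= 1 << _NAMES.index(...) with ValueError skipped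
def pvStep (mask : Nat) (m : List (String × String)) : Nat :=
  if ((PySem.Dict.mk m).get? "prominence" == some "prominent"
      || (PySem.Dict.mk m).get? "prominence" == some "very_prominent") then
    match pvNamesIndex ((PySem.Dict.mk m).get? "mount_name") with
    | some i => mask ||| (1 <<< i)
    | none => mask
  else mask

def determine_motivations_py_alt (mounts : List (List (String × String))) : String :=
  let mask := mounts.foldl pvStep 0
  -- enumerate yields Int indices; i ranges over 0..5 so toNat is exact here
  let parts := ((PySem.List.enumerate pvPHRASES).filter (fun ip => (mask >>> ip.1.toNat) &&& 1 == 1)).map (fun ip => ip.2)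
  if parts = [] then "Balanced personal growth" else PySem.Str.join ", " parts

-- ===== PRECONDITION & SPEC =====
def Spec_determine_motivations_py (mounts : List (List (String × String))) (out : String) : Prop := out = determine_motivations_py_alt mounts
instance (mounts : List (List (String × String))) (out : String) : Decidable (Spec_determine_motivations_py mounts out) := by unfold Spec_determine_motivations_py; infer_instance

-- ===== CLAIM =====
def Claim_equal_determine_motivations_py : Prop := ∀ (mounts : List (List (String × String))), Dom_determine_motivations_py mounts → Spec_determine_motivations_py mounts (determine_motivations_py mounts)

-- ===== LEMMAS AND PROOFS =====

-- bit i of the accumulated mask says: some prominent mount has a name indexing to i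
theorem pvMask_testBit (mounts : List (List (String × String))) (acc : Nat) (i : Nat) :
    (mounts.foldl pvStep acc).testBit i
      = (acc.testBit i || (pvProminentA mounts).any (fun x => pvNamesIndex x == some i)) := by
  induction mounts generalizing acc with
  | nil => simp [pvProminentA]
  | cons m rest ih =>
    rw [List.foldl_cons, ih]
    unfold pvProminentA
    simp only [List.filter_cons]
    by_cases hc : ((PySem.Dict.mk m).get? "prominence" == some "prominent"
        || (PySem.Dict.mk m).get? "prominence" == some "very_prominent") = true
    · rw [if_pos hc]
      simp only [List.map_cons, List.any_cons]
      have hstep : pvStep acc m = (match pvNamesIndex ((PySem.Dict.mk m).get? "mount_name") with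
          | some j => acc ||| (1 <<< j)
          | none => acc) := by
        unfold pvStep; rw [if_pos hc]
      rw [hstep]
      cases hni : pvNamesIndex ((PySem.Dict.mk m).get? "mount_name") with
      | none => simp
      | some j =>
        simp only [Nat.testBit_or, Nat.one_shiftLeft, Nat.testBit_two_pow]
        by_cases hij : j = i
        · simp [hij, Bool.or_assoc]
        · have hf : (j == i) = false := by simp [hij]
          simp [hij, hf, Bool.or_assoc]
    · rw [if_neg hc]
      have hstep : pvStep acc m = acc := by unfold pvStep; rw [if_neg hc]
      rw [hstep]

theorem pvBit_eq_contains (mounts : List (List (String × String))) (i : Nat) (n : String)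
    (hn : PySem.List.index? pvNAMES n = some i) :
    ((mounts.foldl pvStep 0 >>> i) &&& 1 == 1) = (pvProminentA mounts).contains (some n) := by
  have hb : ((mounts.foldl pvStep 0 >>> i) &&& 1 == 1) = (mounts.foldl pvStep 0).testBit i := by
    rw [Nat.testBit, Nat.and_comm]
    rcases Nat.mod_two_eq_zero_or_one (mounts.foldl pvStep 0 >>> i) with h | h <;>
      simp [Nat.and_one_is_mod, h]
  rw [hb, pvMask_testBit]
  simp only [Nat.zero_testBit, Bool.false_or]
  have hfun : ∀ x : Option String, (pvNamesIndex x == some i) = (x == some n) := by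
    intro x
    cases x with
    | none => simp [pvNamesIndex]
    | some s =>
      simp only [pvNamesIndex]
      by_cases hs : s = n
      · rw [hs, hn]; simp
      · have hne : PySem.List.index? pvNAMES s ≠ some i := by
          intro h
          obtain ⟨hk1, he1, _⟩ := PySem.List.getElem_of_index?_eq_some h
          obtain ⟨hk2, he2, _⟩ := PySem.List.getElem_of_index?_eq_some hn
          rw [he1] at he2
          exact hs he2
        rw [Bool.eq_iff_iff]
        simp only [beq_iff_eq, Option.some.injEq]
        constructor
        · intro h; exact absurd h hne
        · intro h; exact absurd h hs
  rw [funext hfun, List.any_beq']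

-- ===== VERDICT =====
set_option maxHeartbeats 1000000 in
theorem determine_motivations_py_spec : Claim_equal_determine_motivations_py := by
  intro mounts _
  unfold Spec_determine_motivations_py determine_motivations_py determine_motivations_py_alt
  have hJ := pvBit_eq_contains mounts 0 "Jupiter" (by decide)
  have hS := pvBit_eq_contains mounts 1 "Saturn" (by decide)
  have hA := pvBit_eq_contains mounts 2 "Apollo" (by decide)
  have hM := pvBit_eq_contains mounts 3 "Mercury" (by decide)
  have hV := pvBit_eq_contains mounts 4 "Venus" (by decide)
  have hL := pvBit_eq_contains mounts 5 "Luna" (by decide)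
  rw [show PySem.List.enumerate pvPHRASES =
    [((0:Int), "Achievement and recognition"), ((1:Int), "Knowledge and understanding"),
     ((2:Int), "Creative expression and beauty"), ((3:Int), "Communication and commerce"),
     ((4:Int), "Love and connection"), ((5:Int), "Imagination and exploration")] from by decide]
  simp only [List.filter_cons, List.filter_nil, Int.toNat_zero, Int.toNat_one,
    show ((2:Int)).toNat = 2 from rfl, show ((3:Int)).toNat = 3 from rfl,
    show ((4:Int)).toNat = 4 from rfl, show ((5:Int)).toNat = 5 from rfl,
    hJ, hS, hA, hM, hV, hL]
  generalize pvProminentA mounts = L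
  by_cases h1 : some "Jupiter" ∈ L <;>
  by_cases h2 : some "Saturn" ∈ L <;>
  by_cases h3 : some "Apollo" ∈ L <;>
  by_cases h4 : some "Mercury" ∈ L <;>
  by_cases h5 : some "Venus" ∈ L <;>
  by_cases h6 : some "Luna" ∈ L <;>
    simp [h1, h2, h3, h4, h5, h6]
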